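-- pv_equiv track=rewrite | github.com/Jaemui/collegeprojects | Spinal_Cord_Spike_Simnulator.py | getLongNorm
-- ===== SOURCE A (Python) =====
-- def getLongNorm(ephysData): #counts the number of Normal Activity under Long Square currents in the 6 different recording areas and puts them into a list
--     lumbar15p = 0
--     lumbar35p = 0
--     lumbar55pM = 0
--     lumbar75p = 0
--     lumbar105p = 0
--     lumbarIMM = 0
--     for key in ephysData:
--         if ephysData[key][2].strip() == "Left 15p":
--             if ephysData[key][9].strip() == "Normal Activity":
--                 lumbar15p+=1
--         if ephysData[key][2].strip() == "Left 35p":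
--             if ephysData[key][9].strip() == "Normal Activity":
--                 lumbar35p+=1
--         if ephysData[key][2].strip() == "Left 55pM":
--             if ephysData[key][9].strip() == "Normal Activity":
--                 lumbar55pM+=1
--         if ephysData[key][2].strip() == "Left 75p":
--             if ephysData[key][9].strip() == "Normal Activity":
--                 lumbar75p+=1
--         if ephysData[key][2].strip() == "Left 105p":
--             if ephysData[key][9].strip() == "Normal Activity":
--                 lumbar105p += 1
--         if ephysData[key][2].strip() == "Left IMM/CeCv/105p":
--             if ephysData[key][9].strip() == "Normal Activity":
--                 lumbarIMM += 1
--     longNormLis = [lumbar15p, lumbar35p, lumbar55pM, lumbar75p, lumbar105p, lumbarIMM]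
--     return longNormLis
-- ===== SOURCE B (Python) =====
-- def getLongNorm(ephysData):
--     labels = ["Left 15p", "Left 35p", "Left 55pM", "Left 75p",
--               "Left 105p", "Left IMM/CeCv/105p"]
--     return [sum(1 for v in ephysData.values()
--                 if v[2].strip() == lab and v[9].strip() == "Normal Activity")
--             for lab in labels]
-- ===== Notes on version B (the rewrite author's own statement) =====
-- stated objective: simpler
-- what changed: Replaces the single fold carrying six named scalar counters with one per-label counting comprehension: for each of the six region labels B counts the matching rows directly, so no mutable counter state exists.
import Mathlib
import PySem

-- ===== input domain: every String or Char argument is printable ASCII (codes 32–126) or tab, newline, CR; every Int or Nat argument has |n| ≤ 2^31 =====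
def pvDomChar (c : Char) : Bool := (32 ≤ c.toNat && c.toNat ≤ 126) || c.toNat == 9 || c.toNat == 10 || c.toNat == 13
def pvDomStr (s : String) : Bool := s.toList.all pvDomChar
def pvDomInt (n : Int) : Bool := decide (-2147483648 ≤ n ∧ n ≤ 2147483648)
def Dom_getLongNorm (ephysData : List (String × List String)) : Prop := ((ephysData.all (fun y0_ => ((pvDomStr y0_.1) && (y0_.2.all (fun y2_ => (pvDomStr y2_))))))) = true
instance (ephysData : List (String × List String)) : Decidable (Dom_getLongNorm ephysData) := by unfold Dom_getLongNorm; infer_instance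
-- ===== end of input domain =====

-- B counts each of the six region labels with one counting pass per label instead of
-- A's single fold over six named scalar counters; same result, no speed claim.

-- shared row accessors: row[2].strip() and row[9].strip() (Pre_ guarantees the indices exist,
-- so the "" default is never the value used by a claimed input)
def pvReg (v : List String) : String := ((PySem.List.pyGet? v 2).map PySem.Str.strip).getD ""
def pvAct (v : List String) : String := ((PySem.List.pyGet? v 9).map PySem.Str.strip).getD ""

-- ===== PORT A =====
-- one loop step of A: the six sequential if-chains over the six counters
def pvStep (c : Int × Int × Int × Int × Int × Int) (kv : String × List String) :
    Int × Int × Int × Int × Int × Int :=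
  let v := kv.2
  let c1 := if pvReg v == "Left 15p" then (if pvAct v == "Normal Activity" then c.1 + 1 else c.1) else c.1
  let c2 := if pvReg v == "Left 35p" then (if pvAct v == "Normal Activity" then c.2.1 + 1 else c.2.1) else c.2.1
  let c3 := if pvReg v == "Left 55pM" then (if pvAct v == "Normal Activity" then c.2.2.1 + 1 else c.2.2.1) else c.2.2.1
  let c4 := if pvReg v == "Left 75p" then (if pvAct v == "Normal Activity" then c.2.2.2.1 + 1 else c.2.2.2.1) else c.2.2.2.1
  let c5 := if pvReg v == "Left 105p" then (if pvAct v == "Normal Activity" then c.2.2.2.2.1 + 1 else c.2.2.2.2.1) else c.2.2.2.2.1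
  let c6 := if pvReg v == "Left IMM/CeCv/105p" then (if pvAct v == "Normal Activity" then c.2.2.2.2.2 + 1 else c.2.2.2.2.2) else c.2.2.2.2.2
  (c1, c2, c3, c4, c5, c6)

def getLongNorm (ephysData : List (String × List String)) : List Int :=
  let t := ephysData.foldl pvStep (0, 0, 0, 0, 0, 0)
  [t.1, t.2.1, t.2.2.1, t.2.2.2.1, t.2.2.2.2.1, t.2.2.2.2.2]

-- ===== PORT B =====
def pvLabels : List String :=
  ["Left 15p", "Left 35p", "Left 55pM", "Left 75p", "Left 105p", "Left IMM/CeCv/105p"]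

def getLongNorm_alt (ephysData : List (String × List String)) : List Int :=
  pvLabels.map (fun lab =>
    (((ephysData.map Prod.snd).countP
        (fun v => pvReg v == lab && pvAct v == "Normal Activity") : Nat) : Int))

-- ===== PRECONDITION & SPEC =====
-- Pre_ excludes exactly the inputs where Python A raises IndexError: a row with fewer than
-- 3 fields, or a row whose region field is one of the six labels but with fewer than 10 fields.
def Pre_getLongNorm (ephysData : List (String × List String)) : Prop :=
  ∀ p ∈ ephysData, 2 < p.2.length ∧ (pvReg p.2 ∈ pvLabels → 9 < p.2.length)
instance (ephysData : List (String × List String)) : Decidable (Pre_getLongNorm ephysData) := by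
  unfold Pre_getLongNorm; infer_instance

def pvWitness_getLongNorm : (List (String × List String)) :=
  [("cell1", ["a", "b", "Left 15p", "", "", "", "", "", "", "Normal Activity"]),
   ("cell2", ["a", "b", "elsewhere"])]

def Spec_getLongNorm (ephysData : List (String × List String)) (out : List Int) : Prop := out = getLongNorm_alt ephysData
instance (ephysData : List (String × List String)) (out : List Int) : Decidable (Spec_getLongNorm ephysData out) := by unfold Spec_getLongNorm; infer_instance

-- ===== CLAIM (what is proved, stated in full; the proofs are below) =====
def Claim_equal_getLongNorm : Prop := ∀ (ephysData : List (String × List String)), Dom_getLongNorm ephysData → Pre_getLongNorm ephysData → Spec_getLongNorm ephysData (getLongNorm ephysData)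

-- ===== LEMMAS AND PROOFS =====

-- the count (as an Int) of rows whose region is `lab` and whose activity is normal
def pvCnt (lab : String) (e : List (String × List String)) : Int :=
  (((e.map Prod.snd).countP (fun v => pvReg v == lab && pvAct v == "Normal Activity") : Nat) : Int)

lemma pvCnt_nil (lab : String) : pvCnt lab [] = 0 := rfl

lemma pvCnt_cons (lab : String) (kv : String × List String) (t : List (String × List String)) :
    pvCnt lab (kv :: t)
      = (if pvReg kv.2 == lab && pvAct kv.2 == "Normal Activity" then 1 else 0) + pvCnt lab t := by
  simp only [pvCnt, List.map_cons, List.countP_cons]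
  split_ifs <;> simp <;> omega

lemma foldA_inv (e : List (String × List String)) :
    ∀ c : Int × Int × Int × Int × Int × Int,
      e.foldl pvStep c =
        (c.1 + pvCnt "Left 15p" e, c.2.1 + pvCnt "Left 35p" e, c.2.2.1 + pvCnt "Left 55pM" e,
         c.2.2.2.1 + pvCnt "Left 75p" e, c.2.2.2.2.1 + pvCnt "Left 105p" e,
         c.2.2.2.2.2 + pvCnt "Left IMM/CeCv/105p" e) := by
  induction e with
  | nil => intro c; simp [pvCnt_nil]
  | cons kv t ih =>
    intro c
    simp only [List.foldl_cons, ih, pvCnt_cons, pvStep]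
    refine Prod.ext ?_ (Prod.ext ?_ (Prod.ext ?_ (Prod.ext ?_ (Prod.ext ?_ ?_)))) <;>
      simp only <;> split_ifs with h1 h2 <;>
      simp_all [Bool.and_eq_true] <;> omega

-- ===== VERDICT (by name: the statement is the Claim_ definition above) =====
theorem getLongNorm_spec : Claim_equal_getLongNorm := by
  intro e _ _
  unfold Spec_getLongNorm
  show getLongNorm e = getLongNorm_alt e
  simp [getLongNorm, getLongNorm_alt, foldA_inv, pvLabels, pvCnt]
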